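-- pv_equiv track=rewrite | github.com/schnappischnap/aoc2023 | day_13_point_of_incidence.py | part_2
-- ===== SOURCE A (Python) =====
-- def part_2(data):
--     answer = 0
--     for pattern in data.split("\n\n"):
--         pattern = pattern.splitlines()
--         for j in [100, 1]:
--             for i in range(1, len(pattern)):
--                 a, b = pattern[:i], pattern[i:]
--                 if sum(sum(e != f for e, f in zip(c, d)) for c, d in zip(reversed(a), b)) == 1:
--                     answer += j * i
--             pattern = list(zip(*pattern))
--     return answer
-- ===== SOURCE B (Python) =====
-- def _score(lines):
--     n = len(lines)
--     ne = str.__ne__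
--     smudge = [0] * (n + 1)
--     for p in range(n):
--         lp = lines[p]
--         for q in range(p + 1, n, 2):
--             smudge[(p + q + 1) // 2] += sum(map(ne, lp, lines[q]))
--     return sum(i for i in range(1, n) if smudge[i] == 1)
--
--
-- def part_2(data):
--     total = 0
--     for block in data.split("\n\n"):
--         rows = block.splitlines()
--         total += 100 * _score(rows)
--         width = min((len(r) for r in rows), default=0)
--         cols = [[r[q] for r in rows] for q in range(width)]
--         total += _score(cols)
--     return total
-- ===== Notes on version B (the rewrite author's own statement) =====
-- stated objective: alternative
-- what changed: Instead of A's per-line rescans (for every candidate reflection line, re-zip the reversed prefix against the suffix and count mismatches), B makes one scatter pass over all opposite-parity row/column pairs (q stepping by 2 from p+1), accumulating each pair's mismatch count into a table indexed by the reflection line (p+q+1)//2, then reads off the lines whose total is exactly 1.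
import Mathlib
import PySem

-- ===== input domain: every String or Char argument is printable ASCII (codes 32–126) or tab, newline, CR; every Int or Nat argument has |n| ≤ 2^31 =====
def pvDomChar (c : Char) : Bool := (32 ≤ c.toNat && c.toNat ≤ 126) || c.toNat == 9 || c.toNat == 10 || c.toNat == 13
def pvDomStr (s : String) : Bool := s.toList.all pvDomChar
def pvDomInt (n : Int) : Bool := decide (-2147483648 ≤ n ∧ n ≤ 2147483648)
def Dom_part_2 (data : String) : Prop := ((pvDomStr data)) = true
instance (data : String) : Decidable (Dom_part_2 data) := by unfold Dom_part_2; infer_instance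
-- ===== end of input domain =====

-- B replaces A's per-line mirror rescans by one scatter pass over all opposite-parity
-- row/column pairs into a smudge-count table read off afterwards (objective: alternative).

-- shared helper: A's sum(e != f for e, f in zip(c, d)) = B's sum(map(str.__ne__, c, d))
-- (both truncate to the shorter row, exactly like Python's zip/map over two sequences)
def pvMism (c d : List Char) : Int :=
  ((c.zip d).map (fun ef => if ef.1 ≠ ef.2 then (1 : Int) else 0)).sum

-- shared helper: Python's list(zip(*rows)) (= B's [[r[q] for r in rows] for q in range(min len)]):
-- both sources transpose by truncating every row to the shortest row's length
def pvMinLen : List (List Char) → Nat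
  | [] => 0
  | [r] => r.length
  | r :: rs => min r.length (pvMinLen rs)

def pvTranspose (rows : List (List Char)) : List (List Char) :=
  (List.range (pvMinLen rows)).map (fun q => rows.map (fun r => r.getD q ' '))

-- ===== PORT A =====
def part_2 (data : String) : Int :=
  (PySem.Chars.splitOn data.toList "\n\n".toList).foldl (fun answer block =>
    (([100, 1] : List Int).foldl (fun st j =>
        ((PySem.List.pyRange 1 (st.2.length : Int)).foldl (fun acc i =>
            let a := PySem.List.slice st.2 none (some i)
            let b := PySem.List.slice st.2 (some i) none
            if ((a.reverse.zip b).map (fun cd => pvMism cd.1 cd.2)).sum = 1 then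
              acc + j * i
            else acc) st.1,
         pvTranspose st.2)) (answer, PySem.Chars.splitlines block)).1) 0

-- ===== PORT B =====
def pvScore (lines : List (List Char)) : Int :=
  let n := lines.length
  let smudge : Array Int :=
    (List.range n).foldl (fun sm p =>
      (List.range' (p + 1) ((n - p) / 2) 2).foldl (fun (sm : Array Int) q =>
        sm.modify ((p + q + 1) / 2) (· + pvMism (lines.getD p []) (lines.getD q []))) sm)
      (Array.replicate (n + 1) 0)
  (((List.range' 1 (n - 1)).filter (fun i => smudge.getD i 0 = 1)).map
      (fun (i : Nat) => (i : Int))).sum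

def part_2_alt (data : String) : Int :=
  (PySem.Chars.splitOn data.toList "\n\n".toList).foldl (fun total block =>
    let rows := PySem.Chars.splitlines block
    total + 100 * pvScore rows + pvScore (pvTranspose rows)) 0

-- ===== PRECONDITION & SPEC =====
def Spec_part_2 (data : String) (out : Int) : Prop := out = part_2_alt data
instance (data : String) (out : Int) : Decidable (Spec_part_2 data out) := by unfold Spec_part_2; infer_instance

-- ===== CLAIM (what is proved, stated in full; the proofs are below) =====
def Claim_equal_part_2 : Prop := ∀ (data : String), Dom_part_2 data → Spec_part_2 data (part_2 data)

-- ===== LEMMAS AND PROOFS =====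

-- the common value both programs compute per reflection line i of a pattern L:
-- total mismatches between the rows mirrored across line i
def pvSpecLine (L : List (List Char)) (i : Nat) : Int :=
  ∑ t ∈ Finset.range (min i (L.length - i)),
    pvMism (L.getD (i - 1 - t) []) (L.getD (i + t) [])

-- the per-orientation score both programs add (times j)
def pvSpecScore (L : List (List Char)) : Int :=
  ((List.range (L.length - 1)).map
    (fun t => if pvSpecLine L (1 + t) = 1 then ((1 + t : Nat) : Int) else 0)).sum

lemma pvSum_range (n : Nat) (f : Nat → Int) :
    ((List.range n).map f).sum = ∑ t ∈ Finset.range n, f t := Int.neg_inj.mp rfl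

lemma pvSum_filter {β : Type} (l : List β) (P : β → Bool) (v : β → Int) :
    ((l.filter P).map v).sum = (l.map (fun x => if P x then v x else 0)).sum := by
  induction l with
  | nil => rfl
  | cons a l ih => by_cases h : P a <;> simp [h, ih]

lemma pvSum_flatMap {α : Type} (l : List α) (f : α → List Int) :
    (l.flatMap f).sum = (l.map (fun a => (f a).sum)).sum := by
  induction l with
  | nil => rfl
  | cons a l ih => simp [ih]

-- A-side: the mirror zip at line i enumerates exactly the pairs (i-1-t, i+t)
lemma pvMirror_eq (L : List (List Char)) (i : Nat) (h1 : 1 ≤ i) (h2 : i ≤ L.length) :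
    (((PySem.List.slice L none (some (i : Int))).reverse.zip
        (PySem.List.slice L (some (i : Int)) none)).map (fun cd => pvMism cd.1 cd.2)).sum
      = pvSpecLine L i := by
  rw [PySem.List.slice_to L (by positivity), PySem.List.slice_from L (by positivity)]
  simp only [Int.toNat_natCast]
  have hz : (L.take i).reverse.zip (L.drop i)
      = (List.range (min i (L.length - i))).map
          (fun t => (L.getD (i - 1 - t) [], L.getD (i + t) [])) := by
    apply List.ext_getElem
    · simp
    · intro t ht1 ht2
      have htlt : t < min i (L.length - i) := by
        simpa using ht2
      simp only [List.getElem_zip, List.getElem_map, List.getElem_range,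
        List.getElem_reverse, List.getElem_drop]
      have hlen : (List.take i L).length = i := by simp; omega
      rw [List.getD_eq_getElem L [] (show i - 1 - t < L.length by omega),
        List.getD_eq_getElem L [] (show i + t < L.length by omega)]
      rw [Prod.mk.injEq]
      refine ⟨?_, rfl⟩
      rw [List.getElem_take]
      congr 1
      omega
  rw [hz, List.map_map, pvSum_range]
  rfl

-- A-side: one j-pass of A's loop
lemma pvApass (L : List (List Char)) (j start : Int) :
    (PySem.List.pyRange 1 (L.length : Int)).foldl (fun acc i =>
        let a := PySem.List.slice L none (some i)
        let b := PySem.List.slice L (some i) none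
        if ((a.reverse.zip b).map (fun cd => pvMism cd.1 cd.2)).sum = 1 then
          acc + j * i
        else acc) start = start + j * pvSpecScore L := by
  rw [PySem.List.pyRange_of_pos 1 (L.length : Int) Int.one_pos]
  have hcnt : (if (1 : Int) < (L.length : Int)
        then (((L.length : Int) - 1 + 1 - 1) / 1).toNat else 0) = L.length - 1 := by
    simp only [Int.ediv_one]
    split <;> omega
  rw [hcnt, List.foldl_map]
  have hstep : (fun (acc : Int) (k : Nat) =>
        (fun acc (i : Int) =>
          let a := PySem.List.slice L none (some i)
          let b := PySem.List.slice L (some i) none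
          if ((a.reverse.zip b).map (fun cd => pvMism cd.1 cd.2)).sum = 1 then
            acc + j * i
          else acc) acc (1 + 1 * (k : Int)))
      = fun acc k => acc +
          (if (((PySem.List.slice L none (some ((1 + k : Nat) : Int))).reverse.zip
              (PySem.List.slice L (some ((1 + k : Nat) : Int)) none)).map
                (fun cd => pvMism cd.1 cd.2)).sum = 1
            then j * ((1 + k : Nat) : Int) else 0) := by
    funext acc k
    have hc : (1 : Int) + 1 * (k : Int) = ((1 + k : Nat) : Int) := by push_cast; ring
    simp only [hc]
    split
    · rfl
    · simp
  rw [hstep, PySem.List.foldl_add]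
  congr 1
  rw [pvSpecScore]
  rw [List.map_congr_left (g := fun t =>
      j * (if pvSpecLine L (1 + t) = 1 then ((1 + t : Nat) : Int) else 0))
    (by
      intro t ht
      have htl : t < L.length - 1 := List.mem_range.mp ht
      rw [pvMirror_eq L (1 + t) (by omega) (by omega)]
      simp only [mul_ite, mul_zero])]
  rw [List.sum_map_mul_left]

-- B-side machinery: the scatter over pairs as a fold over an explicit pair list
def pvStep (L : List (List Char)) (sm : Array Int) (pq : Nat × Nat) : Array Int :=
  sm.modify ((pq.1 + pq.2 + 1) / 2) (· + pvMism (L.getD pq.1 []) (L.getD pq.2 []))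

def pvPairs (n : Nat) : List (Nat × Nat) :=
  (List.range n).flatMap (fun p => (List.range' (p + 1) ((n - p) / 2) 2).map (fun q => (p, q)))

lemma pvRange'_step2 (k : Nat) : ∀ s : Nat, List.range' s k 2 = (List.range k).map (fun t => s + 2 * t) := by
  induction k with
  | zero => intro s; rfl
  | succ k ih =>
    intro s
    rw [List.range'_succ, ih (s + 2), List.range_succ_eq_map, List.map_cons, List.map_map]
    refine congrArg₂ _ (by omega) (List.map_congr_left (fun t _ => ?_))
    show s + 2 + 2 * t = s + 2 * (t + 1)
    omega

lemma pvFold_pairs (L : List (List Char)) (n : Nat) (init : Array Int) :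
    (List.range n).foldl (fun sm p =>
        (List.range' (p + 1) ((n - p) / 2) 2).foldl (fun (sm : Array Int) q =>
          sm.modify ((p + q + 1) / 2) (· + pvMism (L.getD p []) (L.getD q []))) sm) init
      = (pvPairs n).foldl (pvStep L) init := by
  rw [pvPairs, List.foldl_flatMap]
  congr 1
  funext sm p
  rw [List.foldl_map]
  rfl

lemma pvScatter (L : List (List Char)) (Lp : List (Nat × Nat)) (arr : Array Int) (i : Nat)
    (hi : i < arr.size)
    (hk : ∀ x ∈ Lp, (x.1 + x.2 + 1) / 2 < arr.size) :
    ((Lp.foldl (pvStep L) arr).getD i 0)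
      = arr.getD i 0
        + ((Lp.filter (fun pq => (pq.1 + pq.2 + 1) / 2 == i)).map
            (fun pq => pvMism (L.getD pq.1 []) (L.getD pq.2 []))).sum := by
  induction Lp generalizing arr with
  | nil => simp
  | cons x xs ih =>
    rw [List.foldl_cons, List.filter_cons,
      show pvStep L arr x
          = arr.modify ((x.1 + x.2 + 1) / 2) (· + pvMism (L.getD x.1 []) (L.getD x.2 []))
        from rfl,
      ih (arr.modify ((x.1 + x.2 + 1) / 2) (· + pvMism (L.getD x.1 []) (L.getD x.2 [])))
        (by simpa using hi)
        (fun y hy => by simpa using hk y (List.mem_cons_of_mem _ hy))]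
    by_cases hki : (x.1 + x.2 + 1) / 2 = i
    · rw [if_pos (by simp [hki])]
      simp only [List.map_cons, List.sum_cons]
      have harr : (arr.modify ((x.1 + x.2 + 1) / 2)
            (· + pvMism (L.getD x.1 []) (L.getD x.2 []))).getD i 0
          = arr.getD i 0 + pvMism (L.getD x.1 []) (L.getD x.2 []) := by
        simp [Array.getD_eq_getD_getElem?, Array.getElem?_modify, hki,
          Array.getElem?_eq_getElem hi]
      rw [harr]; ring
    · rw [if_neg (by simp [hki])]
      have harr : (arr.modify ((x.1 + x.2 + 1) / 2)
            (· + pvMism (L.getD x.1 []) (L.getD x.2 []))).getD i 0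
          = arr.getD i 0 := by
        simp [Array.getD_eq_getD_getElem?, Array.getElem?_modify, hki]
      rw [harr]

lemma pvPairs_key_lt (n : Nat) (x : Nat × Nat) (hx : x ∈ pvPairs n) :
    (x.1 + x.2 + 1) / 2 < n + 1 := by
  obtain ⟨a, b⟩ := x
  simp [pvPairs, List.mem_flatMap, List.mem_range, List.mem_range'] at hx
  obtain ⟨p, hp, t, ht, hab⟩ := hx
  omega

-- the combinatorial heart: opposite-parity pairs scattered to line i are exactly
-- the mirrored pairs (i-1-t, i+t)
lemma pvComb (g : Nat → Nat → Int) (n i : Nat) (h1 : 1 ≤ i) (h2 : i < n) :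
    (∑ p ∈ Finset.range n, ∑ t ∈ Finset.range ((n - p) / 2),
        (if ((p + (p + 1 + 2 * t) + 1) / 2 == i) then g p (p + 1 + 2 * t) else 0))
      = ∑ t ∈ Finset.range (min i (n - i)), g (i - 1 - t) (i + t) := by
  have houter : ∀ p ∈ Finset.range n,
      (∑ t ∈ Finset.range ((n - p) / 2),
          (if ((p + (p + 1 + 2 * t) + 1) / 2 == i) then g p (p + 1 + 2 * t) else 0))
        = (if i - min i (n - i) ≤ p ∧ p < i then g p (2 * i - 1 - p) else 0) := by
    intro p hp
    have hpn := Finset.mem_range.mp hp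
    by_cases hpi : p < i
    · have hq : ∀ t ∈ Finset.range ((n - p) / 2),
          (if ((p + (p + 1 + 2 * t) + 1) / 2 == i) then g p (p + 1 + 2 * t) else 0)
            = (if t = i - p - 1 then g p (p + 1 + 2 * t) else 0) := by
        intro t _
        have hiff : (((p + (p + 1 + 2 * t) + 1) / 2 == i) = true) ↔ t = i - p - 1 := by
          simp only [beq_iff_eq]
          omega
        exact if_congr hiff rfl rfl
      rw [Finset.sum_congr rfl hq,
        Finset.sum_ite_eq' (Finset.range ((n - p) / 2)) (i - p - 1) (fun t => g p (p + 1 + 2 * t))]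
      have hmem : (i - p - 1 ∈ Finset.range ((n - p) / 2)) ↔ (i - min i (n - i) ≤ p ∧ p < i) := by
        rw [Finset.mem_range]; omega
      rw [if_congr hmem rfl rfl]
      by_cases hc : i - min i (n - i) ≤ p ∧ p < i
      · rw [if_pos hc, if_pos hc, show p + 1 + 2 * (i - p - 1) = 2 * i - 1 - p by omega]
      · rw [if_neg hc, if_neg hc]
    · rw [if_neg (by omega)]
      apply Finset.sum_eq_zero
      intro t _
      have hcf : ¬ (((p + (p + 1 + 2 * t) + 1) / 2 == i) = true) := by
        simp only [beq_iff_eq]; omega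
      rw [if_neg hcf]
  rw [Finset.sum_congr rfl houter, ← Finset.sum_filter]
  have hfil : (Finset.range n).filter (fun p => i - min i (n - i) ≤ p ∧ p < i)
      = Finset.Ico (i - min i (n - i)) i := by
    ext p; simp [Finset.mem_Ico]; omega
  rw [hfil, Finset.sum_Ico_eq_sum_range,
    show i - (i - min i (n - i)) = min i (n - i) by omega]
  rw [Finset.sum_congr rfl (fun t ht => by
    have htk := Finset.mem_range.mp ht
    show g (i - min i (n - i) + t) (2 * i - 1 - (i - min i (n - i) + t))
        = g (i - 1 - (min i (n - i) - 1 - t)) (i + (min i (n - i) - 1 - t))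
    rw [show i - min i (n - i) + t = i - 1 - (min i (n - i) - 1 - t) by omega,
      show 2 * i - 1 - (i - 1 - (min i (n - i) - 1 - t)) = i + (min i (n - i) - 1 - t) by omega])]
  exact Finset.sum_range_reflect (fun s => g (i - 1 - s) (i + s)) (min i (n - i))

-- B-side: the smudge table cell i holds exactly pvSpecLine L i
lemma pvSmudge_eq (L : List (List Char)) (i : Nat) (h1 : 1 ≤ i) (h2 : i < L.length) :
    (((List.range L.length).foldl (fun sm p =>
        (List.range' (p + 1) ((L.length - p) / 2) 2).foldl (fun (sm : Array Int) q =>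
          sm.modify ((p + q + 1) / 2) (· + pvMism (L.getD p []) (L.getD q []))) sm)
        (Array.replicate (L.length + 1) 0)).getD i 0)
      = pvSpecLine L i := by
  rw [pvFold_pairs L L.length (Array.replicate (L.length + 1) 0)]
  rw [pvScatter L (pvPairs L.length) (Array.replicate (L.length + 1) 0) i
    (by simp; omega)
    (fun x hx => by simpa using pvPairs_key_lt L.length x hx)]
  have h0 : (Array.replicate (L.length + 1) (0 : Int)).getD i 0 = 0 := by
    simp [Array.getD_eq_getD_getElem?, show i < L.length + 1 by omega]
  rw [h0, zero_add, pvSum_filter, pvPairs, List.map_flatMap, pvSum_flatMap,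
    pvSum_range]
  rw [Finset.sum_congr rfl (fun p hp => by
    show ((((List.range' (p + 1) ((L.length - p) / 2) 2).map (fun q => (p, q))).map
        (fun pq => if ((pq.1 + pq.2 + 1) / 2 == i) then
            pvMism (L.getD pq.1 []) (L.getD pq.2 []) else 0)).sum)
      = ∑ t ∈ Finset.range ((L.length - p) / 2),
          (if ((p + (p + 1 + 2 * t) + 1) / 2 == i) then
            pvMism (L.getD p []) (L.getD (p + 1 + 2 * t) []) else 0)
    rw [List.map_map, pvRange'_step2, List.map_map, pvSum_range]
    exact Finset.sum_congr rfl (fun k _ => rfl))]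
  rw [pvComb (fun p q => pvMism (L.getD p []) (L.getD q [])) L.length i h1 h2]
  rfl

lemma pvScore_eq (L : List (List Char)) : pvScore L = pvSpecScore L := by
  simp only [pvScore]
  rw [pvSum_filter, List.range'_eq_map_range, List.map_map, pvSpecScore]
  apply congrArg List.sum
  apply List.map_congr_left
  intro t ht
  have htl := List.mem_range.mp ht
  simp only [Function.comp_apply, decide_eq_true_eq]
  rw [pvSmudge_eq L (1 + t) (by omega) (by omega)]

lemma pvBlock_eq (block : List Char) (answer : Int) :
    (([100, 1] : List Int).foldl (fun st j =>
        ((PySem.List.pyRange 1 (st.2.length : Int)).foldl (fun acc i =>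
            let a := PySem.List.slice st.2 none (some i)
            let b := PySem.List.slice st.2 (some i) none
            if ((a.reverse.zip b).map (fun cd => pvMism cd.1 cd.2)).sum = 1 then
              acc + j * i
            else acc) st.1,
         pvTranspose st.2)) (answer, PySem.Chars.splitlines block)).1
      = answer + 100 * pvScore (PySem.Chars.splitlines block)
          + pvScore (pvTranspose (PySem.Chars.splitlines block)) := by
  simp only [List.foldl_cons, List.foldl_nil]
  rw [pvApass, pvApass, pvScore_eq, pvScore_eq]
  ring

-- ===== VERDICT (by name: the statement is the Claim_ definition above) =====
lemma pvFold_eq (blocks : List (List Char)) (acc : Int) :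
    blocks.foldl (fun answer block =>
      (([100, 1] : List Int).foldl (fun st j =>
          ((PySem.List.pyRange 1 (st.2.length : Int)).foldl (fun acc i =>
              let a := PySem.List.slice st.2 none (some i)
              let b := PySem.List.slice st.2 (some i) none
              if ((a.reverse.zip b).map (fun cd => pvMism cd.1 cd.2)).sum = 1 then
                acc + j * i
              else acc) st.1,
           pvTranspose st.2)) (answer, PySem.Chars.splitlines block)).1) acc
    = blocks.foldl (fun total block =>
        let rows := PySem.Chars.splitlines block
        total + 100 * pvScore rows + pvScore (pvTranspose rows)) acc := by
  induction blocks generalizing acc with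
  | nil => rfl
  | cons b bs ih =>
    conv_lhs => rw [List.foldl_cons]
    conv_rhs => rw [List.foldl_cons]
    rw [pvBlock_eq b acc]
    exact ih _

-- ===== VERDICT (by name: the statement is the Claim_ definition above) =====
theorem part_2_spec : Claim_equal_part_2 := by
  intro data _
  unfold Spec_part_2 part_2 part_2_alt
  exact pvFold_eq _ 0
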